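-- pv_equiv track=rewrite | github.com/TheSun12/cosmos-tetris | main.py | generate_level
-- ===== SOURCE A (Python) =====
-- def generate_level(dct={}):
--     '''генерация уровня'''
--     pole = [[(0, 0, 0) for i in range(10)] for j in range(20)]
--     for row in range(20):
--         for col in range(10):
--             if (col, row) in dct:
--                 # добавление фигуры на поле
--                 elem = dct[(col, row)]
--                 pole[row][col] = elem
--     return pole
-- ===== SOURCE B (Python) =====
-- def generate_level(dct={}):
--     '''генерация уровня'''
--     pole = [[(0, 0, 0) for _ in range(10)] for _ in range(20)]
--     for (col, row), elem in dct.items():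
--         if 0 <= col < 10 and 0 <= row < 20:
--             pole[row][col] = elem
--     return pole
-- ===== Notes on version B (the rewrite author's own statement) =====
-- stated objective: idiomatic
-- what changed: Instead of scanning all 200 grid cells and membership-testing each coordinate against the dict, B makes a single pass over the dict's entries and writes each in-range entry directly into the blank grid.
import Mathlib
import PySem

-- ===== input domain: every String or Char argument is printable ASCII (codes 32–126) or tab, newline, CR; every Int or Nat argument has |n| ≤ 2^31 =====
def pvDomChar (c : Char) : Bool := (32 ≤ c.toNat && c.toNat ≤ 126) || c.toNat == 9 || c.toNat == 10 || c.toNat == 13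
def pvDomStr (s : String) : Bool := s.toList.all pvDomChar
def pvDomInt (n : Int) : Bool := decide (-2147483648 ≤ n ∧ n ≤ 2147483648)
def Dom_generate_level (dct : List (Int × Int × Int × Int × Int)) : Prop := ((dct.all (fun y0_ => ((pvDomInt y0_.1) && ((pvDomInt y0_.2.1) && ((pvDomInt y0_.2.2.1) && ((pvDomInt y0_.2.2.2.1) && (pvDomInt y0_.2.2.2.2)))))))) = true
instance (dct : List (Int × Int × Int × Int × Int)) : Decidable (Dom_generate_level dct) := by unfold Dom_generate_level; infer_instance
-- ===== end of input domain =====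

-- B replaces A's scan of all 200 grid cells (each with a dict membership test and lookup)
-- by a single pass over the dict's entries, writing each in-range entry into the blank grid.

-- `pole[row][col] = elem` for in-range indices (used by both ports)
def writeCell (pole : List (List (Int × Int × Int))) (r c : Nat) (v : Int × Int × Int) :
    List (List (Int × Int × Int)) :=
  pole.set r ((pole.getD r []).set c v)

-- ===== PORT A =====
-- first-match lookup in the association list: `dct[(col,row)]` / `(col,row) in dct`
def lookupA : List (Int × Int × Int × Int × Int) → Int → Int → Option (Int × Int × Int)
  | [], _, _ => none
  | (c, r, x, y, z) :: t, col, row =>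
      if c = col ∧ r = row then some (x, y, z) else lookupA t col row

def generate_level (dct : List (Int × Int × Int × Int × Int)) : List (List (Int × Int × Int)) :=
  let pole := (List.range 20).map (fun _ => (List.range 10).map (fun _ => ((0:Int), (0:Int), (0:Int))))
  (List.range 20).foldl (fun pole (row : Nat) =>
    (List.range 10).foldl (fun pole (col : Nat) =>
      match lookupA dct (col : Int) (row : Int) with
      | some elem => writeCell pole row col elem
      | none => pole) pole) pole

-- ===== PORT B =====
def generate_level_alt (dct : List (Int × Int × Int × Int × Int)) : List (List (Int × Int × Int)) :=
  let pole := (List.range 20).map (fun _ => (List.range 10).map (fun _ => ((0:Int), (0:Int), (0:Int))))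
  dct.foldl (fun pole e =>
    match e with
    | (col, row, x, y, z) =>
      if 0 ≤ col ∧ col < 10 ∧ 0 ≤ row ∧ row < 20 then
        writeCell pole row.toNat col.toNat (x, y, z)
      else pole) pole

-- ===== PRECONDITION & SPEC =====
-- Pre_ excludes association lists with duplicate (col,row) keys: those do not represent a
-- Python dict (a dict's keys are distinct), and on them A's first-match lookup and B's
-- last-write order are both accidental readings of the same malformed input.
def Pre_generate_level (dct : List (Int × Int × Int × Int × Int)) : Prop :=
  (dct.map (fun e => (e.1, e.2.1))).Nodup
instance (dct : List (Int × Int × Int × Int × Int)) : Decidable (Pre_generate_level dct) := by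
  unfold Pre_generate_level; infer_instance
def pvWitness_generate_level : (List (Int × Int × Int × Int × Int)) :=
  [(0, 0, 255, 0, 0), (3, 5, 0, 255, 0), (-1, 30, 1, 2, 3)]
def Spec_generate_level (dct : List (Int × Int × Int × Int × Int)) (out : List (List (Int × Int × Int))) : Prop := out = generate_level_alt dct
instance (dct : List (Int × Int × Int × Int × Int)) (out : List (List (Int × Int × Int))) : Decidable (Spec_generate_level dct out) := by unfold Spec_generate_level; infer_instance

-- ===== CLAIM (what is proved, stated in full; the proofs are below) =====
def Claim_equal_generate_level : Prop := ∀ (dct : List (Int × Int × Int × Int × Int)), Dom_generate_level dct → Pre_generate_level dct → Spec_generate_level dct (generate_level dct)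

-- ===== LEMMAS AND PROOFS =====

def pvBlank : List (List (Int × Int × Int)) :=
  (List.range 20).map (fun _ => (List.range 10).map (fun _ => ((0:Int), (0:Int), (0:Int))))

def getCell (pole : List (List (Int × Int × Int))) (r c : Nat) : Int × Int × Int :=
  (pole.getD r []).getD c (0, 0, 0)

def Shaped (pole : List (List (Int × Int × Int))) : Prop :=
  pole.length = 20 ∧ ∀ r < 20, (pole.getD r []).length = 10

theorem getD_eq_get (pole : List (List (Int × Int × Int))) (r : Nat) (h : r < pole.length) :
    pole.getD r [] = pole[r] := by
  simp [List.getD, List.getElem?_eq_getElem h]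

theorem shaped_write {pole : List (List (Int × Int × Int))} (hs : Shaped pole)
    (r c : Nat) (v : Int × Int × Int) : Shaped (writeCell pole r c v) := by
  obtain ⟨h1, h2⟩ := hs
  have hlen : (writeCell pole r c v).length = 20 := by simp [writeCell, h1]
  refine ⟨hlen, ?_⟩
  intro r' hr'
  rw [getD_eq_get _ _ (by rw [hlen]; omega)]
  unfold writeCell
  rw [List.getElem_set]
  by_cases hrr : r = r'
  · rw [if_pos hrr, List.length_set, hrr]
    exact h2 r' hr'
  · rw [if_neg hrr, ← getD_eq_get _ _ (by omega)]
    exact h2 r' hr'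

theorem getCell_write {pole : List (List (Int × Int × Int))} (hs : Shaped pole)
    {r c : Nat} (hr : r < 20) (hc : c < 10) (v : Int × Int × Int)
    {r' c' : Nat} (hr' : r' < 20) (hc' : c' < 10) :
    getCell (writeCell pole r c v) r' c' =
      if r' = r ∧ c' = c then v else getCell pole r' c' := by
  obtain ⟨h1, h2⟩ := hs
  have hlen : (writeCell pole r c v).length = 20 := by simp [writeCell, h1]
  unfold getCell
  rw [getD_eq_get _ _ (by rw [hlen]; omega)]
  unfold writeCell
  rw [List.getElem_set]
  by_cases hrr : r = r'
  · subst hrr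
    rw [if_pos rfl]
    have hlr : (pole.getD r []).length = 10 := h2 r hr
    rw [List.getD_eq_getElem _ _ (by rw [List.length_set, hlr]; omega)]
    rw [List.getElem_set]
    by_cases hcc : c = c'
    · subst hcc
      rw [if_pos rfl, if_pos ⟨rfl, rfl⟩]
    · rw [if_neg hcc, if_neg (by rintro ⟨-, h⟩; exact hcc h.symm)]
      exact (List.getD_eq_getElem _ _ (by rw [hlr]; omega)).symm
  · rw [if_neg hrr, if_neg (by rintro ⟨h, -⟩; exact hrr h.symm)]
    exact congrArg (fun l => l.getD c' ((0:Int), (0:Int), (0:Int))) (getD_eq_get pole r' (by omega)).symm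

theorem pvBlank_eq : pvBlank = List.replicate 20 (List.replicate 10 ((0:Int), (0:Int), (0:Int))) := by
  rfl

theorem shaped_blank : Shaped pvBlank := by
  rw [Shaped, pvBlank_eq]
  refine ⟨List.length_replicate, ?_⟩
  intro r hr
  rw [getD_eq_get _ _ (by rw [List.length_replicate]; omega), List.getElem_replicate,
    List.length_replicate]

theorem grid_ext {p q : List (List (Int × Int × Int))} (hp : Shaped p) (hq : Shaped q)
    (h : ∀ r < 20, ∀ c < 10, getCell p r c = getCell q r c) : p = q := by
  obtain ⟨hp1, hp2⟩ := hp
  obtain ⟨hq1, hq2⟩ := hq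
  apply List.ext_getElem (by omega)
  intro r hr _
  have hr20 : r < 20 := by omega
  apply List.ext_getElem (by rw [← getD_eq_get _ _ (by omega), ← getD_eq_get _ _ (by omega), hp2 r hr20, hq2 r hr20])
  intro c hc _
  have hc10 : c < 10 := by
    have := hp2 r hr20; rw [getD_eq_get _ _ (by omega)] at this; omega
  have := h r hr20 c hc10
  unfold getCell at this
  rwa [getD_eq_get _ _ (by omega), getD_eq_get _ _ (by omega),
    List.getD_eq_getElem _ _ (by omega), List.getD_eq_getElem _ _ (by omega)] at this

theorem lookupA_mem_keys {dct : List (Int × Int × Int × Int × Int)} {col row : Int}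
    {v : Int × Int × Int} (h : lookupA dct col row = some v) :
    (col, row) ∈ dct.map (fun e => (e.1, e.2.1)) := by
  induction dct with
  | nil => simp [lookupA] at h
  | cons e t ih =>
    obtain ⟨c, r, x, y, z⟩ := e
    simp only [lookupA] at h
    split at h
    · rename_i hcr; simp_all
    · simp [ih h]

-- the B-side fold step
def stepB (pole : List (List (Int × Int × Int))) (e : Int × Int × Int × Int × Int) :
    List (List (Int × Int × Int)) :=
  match e with
  | (col, row, x, y, z) =>
    if 0 ≤ col ∧ col < 10 ∧ 0 ≤ row ∧ row < 20 then
      writeCell pole row.toNat col.toNat (x, y, z)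
    else pole

theorem shaped_stepB {pole : List (List (Int × Int × Int))} (hs : Shaped pole)
    (e : Int × Int × Int × Int × Int) : Shaped (stepB pole e) := by
  obtain ⟨col, row, x, y, z⟩ := e
  simp only [stepB]
  split
  · exact shaped_write hs _ _ _
  · exact hs

theorem foldB_char (dct : List (Int × Int × Int × Int × Int))
    (hnd : (dct.map (fun e => (e.1, e.2.1))).Nodup) :
    ∀ pole, Shaped pole → ∀ r < 20, ∀ c < 10,
    getCell (dct.foldl stepB pole) r c =
      match lookupA dct (c : Int) (r : Int) with
      | some v => v
      | none => getCell pole r c := by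
  induction dct with
  | nil => intro pole _ r _ c _; simp [lookupA]
  | cons e t ih =>
    intro pole hs r hr c hc
    obtain ⟨col, row, x, y, z⟩ := e
    simp only [List.map_cons, List.nodup_cons] at hnd
    obtain ⟨hnotin, hnd'⟩ := hnd
    have hstep : Shaped (stepB pole (col, row, x, y, z)) := shaped_stepB hs _
    rw [List.foldl_cons, ih hnd' _ hstep r hr c hc]
    simp only [lookupA]
    by_cases hmatch : col = (c : Int) ∧ row = (r : Int)
    · have hnone : lookupA t (c : Int) (r : Int) = none := by
        cases h : lookupA t (c : Int) (r : Int) with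
        | none => rfl
        | some v =>
          exact absurd (lookupA_mem_keys h) (by rw [← hmatch.1, ← hmatch.2]; exact hnotin)
      rw [hnone, if_pos hmatch]
      have hguard : 0 ≤ col ∧ col < 10 ∧ 0 ≤ row ∧ row < 20 := by
        obtain ⟨h1, h2⟩ := hmatch; subst h1 h2; omega
      have hcol : col.toNat = c := by rw [hmatch.1]; simp
      have hrow : row.toNat = r := by rw [hmatch.2]; simp
      show getCell (stepB pole (col, row, x, y, z)) r c = (x, y, z)
      simp only [stepB]
      rw [if_pos hguard, hcol, hrow, getCell_write hs hr hc _ hr hc]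
      simp
    · rw [if_neg hmatch]
      cases h : lookupA t (c : Int) (r : Int) with
      | some v => rfl
      | none =>
        show getCell (stepB pole (col, row, x, y, z)) r c = getCell pole r c
        simp only [stepB]
        split
        · rename_i hguard
          obtain ⟨hg1, hg2, hg3, hg4⟩ := hguard
          rw [getCell_write hs (by omega) (by omega) _ hr hc]
          have hne : ¬ (r = row.toNat ∧ c = col.toNat) := by
            rintro ⟨h1, h2⟩
            exact hmatch ⟨by omega, by omega⟩
          rw [if_neg hne]
        · rfl

-- the A-side fold steps
def innerStep (dct : List (Int × Int × Int × Int × Int)) (row : Nat)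
    (pole : List (List (Int × Int × Int))) (col : Nat) : List (List (Int × Int × Int)) :=
  match lookupA dct (col : Int) (row : Int) with
  | some elem => writeCell pole row col elem
  | none => pole

theorem shaped_innerStep {pole : List (List (Int × Int × Int))} (hs : Shaped pole)
    (dct : List (Int × Int × Int × Int × Int)) (row col : Nat) :
    Shaped (innerStep dct row pole col) := by
  unfold innerStep
  split
  · exact shaped_write hs _ _ _
  · exact hs

theorem shaped_innerFold {pole : List (List (Int × Int × Int))} (hs : Shaped pole)
    (dct : List (Int × Int × Int × Int × Int)) (row : Nat) (n : Nat) :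
    Shaped ((List.range n).foldl (innerStep dct row) pole) := by
  induction n with
  | zero => simpa using hs
  | succ n ih => rw [List.range_succ, List.foldl_append]; exact shaped_innerStep ih dct row n

theorem innerFold_char (dct : List (Int × Int × Int × Int × Int)) (row : Nat) (hrow : row < 20) :
    ∀ n ≤ 10, ∀ pole, Shaped pole → ∀ r < 20, ∀ c < 10,
    getCell ((List.range n).foldl (innerStep dct row) pole) r c =
      if r = row ∧ c < n then (lookupA dct (c : Int) (r : Int)).getD (getCell pole r c)
      else getCell pole r c := by
  intro n
  induction n with
  | zero => intro _ pole _ r _ c _; simp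
  | succ n ih =>
    intro hn pole hs r hr c hc
    rw [List.range_succ, List.foldl_append, List.foldl_cons, List.foldl_nil]
    have hsn := shaped_innerFold hs dct row n
    have ihh := ih (by omega) pole hs r hr c hc
    cases hlook : lookupA dct (n : Int) (row : Int) with
    | some v =>
      simp only [innerStep, hlook]
      rw [getCell_write hsn hrow (by omega) _ hr hc]
      by_cases hcase : r = row ∧ c = n
      · obtain ⟨h1, h2⟩ := hcase; subst h1 h2
        rw [if_pos ⟨rfl, rfl⟩, if_pos ⟨rfl, by omega⟩, hlook]; rfl
      · rw [if_neg hcase, ihh]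
        have h3 : (r = row ∧ c < n + 1) ↔ ((r = row ∧ c < n) ∨ (r = row ∧ c = n)) := by
          constructor
          · rintro ⟨ha, hb⟩
            rcases Nat.lt_succ_iff_lt_or_eq.mp hb with h' | h'
            · exact Or.inl ⟨ha, h'⟩
            · exact Or.inr ⟨ha, h'⟩
          · rintro (⟨ha, hb⟩ | ⟨ha, hb⟩) <;> exact ⟨ha, by omega⟩
        by_cases h1 : r = row ∧ c < n
        · rw [if_pos h1, if_pos (h3.mpr (Or.inl h1))]
        · rw [if_neg h1, if_neg (fun h => (h3.mp h).elim h1 hcase)]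
    | none =>
      simp only [innerStep, hlook]
      rw [ihh]
      by_cases h1 : r = row ∧ c < n
      · rw [if_pos h1, if_pos ⟨h1.1, by omega⟩]
      · rw [if_neg h1]
        by_cases h2 : r = row ∧ c < n + 1
        · have hcn : c = n := by omega
          rw [if_pos h2, h2.1, hcn, hlook]; rfl
        · rw [if_neg h2]

def outerStep (dct : List (Int × Int × Int × Int × Int))
    (pole : List (List (Int × Int × Int))) (row : Nat) : List (List (Int × Int × Int)) :=
  (List.range 10).foldl (innerStep dct row) pole

theorem outerFold_char (dct : List (Int × Int × Int × Int × Int)) :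
    ∀ m ≤ 20, ∀ pole, Shaped pole →
    Shaped ((List.range m).foldl (outerStep dct) pole) ∧
    (∀ r < 20, ∀ c < 10,
      getCell ((List.range m).foldl (outerStep dct) pole) r c =
        if r < m then (lookupA dct (c : Int) (r : Int)).getD (getCell pole r c)
        else getCell pole r c) := by
  intro m
  induction m with
  | zero => intro _ pole hs; exact ⟨by simpa using hs, by intro r _ c _; simp⟩
  | succ m ih =>
    intro hm pole hs
    obtain ⟨ihs, ihc⟩ := ih (by omega) pole hs
    rw [List.range_succ, List.foldl_append, List.foldl_cons, List.foldl_nil]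
    refine ⟨shaped_innerFold ihs dct m 10, ?_⟩
    intro r hr c hc
    rw [show outerStep dct ((List.range m).foldl (outerStep dct) pole) m =
        (List.range 10).foldl (innerStep dct m) ((List.range m).foldl (outerStep dct) pole) from rfl]
    rw [innerFold_char dct m (by omega) 10 (by omega) _ ihs r hr c hc, ihc r hr c hc]
    by_cases h1 : r = m
    · subst h1
      rw [if_pos ⟨rfl, hc⟩, if_neg (by omega), if_pos (by omega)]
    · rw [if_neg (by simp [h1])]
      by_cases h2 : r < m
      · rw [if_pos h2, if_pos (by omega)]
      · rw [if_neg h2, if_neg (by omega)]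

theorem generate_level_eq_fold (dct : List (Int × Int × Int × Int × Int)) :
    generate_level dct = (List.range 20).foldl (outerStep dct) pvBlank := rfl

theorem generate_level_alt_eq_fold (dct : List (Int × Int × Int × Int × Int)) :
    generate_level_alt dct = dct.foldl stepB pvBlank := rfl

theorem shaped_foldB : ∀ (l : List (Int × Int × Int × Int × Int))
    {pole : List (List (Int × Int × Int))}, Shaped pole → Shaped (l.foldl stepB pole)
  | [], _, hs => hs
  | e :: t, _, hs => shaped_foldB t (shaped_stepB hs e)

-- ===== VERDICT (by name: the statement is the Claim_ definition above) =====
theorem generate_level_spec : Claim_equal_generate_level := by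
  intro dct _ hpre
  unfold Spec_generate_level
  rw [generate_level_eq_fold, generate_level_alt_eq_fold]
  obtain ⟨hAs, hAc⟩ := outerFold_char dct 20 (by omega) pvBlank shaped_blank
  apply grid_ext hAs (shaped_foldB dct shaped_blank)
  intro r hr c hc
  rw [hAc r hr c hc, foldB_char dct hpre _ shaped_blank r hr c hc, if_pos hr]
  cases h : lookupA dct (c : Int) (r : Int) <;> simp
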